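-- pv_equiv track=rewrite | github.com/Leonid-SV/LP | LP_Lessons/lesson2/learn_offline_work/for_dict_challenges.py | name_counter
-- ===== SOURCE A (Python) =====
-- def name_counter(s):
--
--     n_counts = {}
--
--     for persons in s:
--         x = persons['first_name']
--         if x in n_counts:
--             n_counts[x] += 1
--         else:
--             n_counts[x] = 1
--
--     return n_counts
-- ===== SOURCE B (Python) =====
-- def name_counter(s):
--     # One pass collecting the names (preserves KeyError on a missing
--     # 'first_name'), then count-by-rescanning in first-seen order.
--     names = [persons['first_name'] for persons in s]
--     result = {}
--     for name in names:
--         if name not in result: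
--             result[name] = names.count(name)
--     return result
-- ===== Notes on version B (the rewrite author's own statement) =====
-- stated objective: alternative
-- what changed: Instead of A's single incremental pass that updates a running counter per record, B first extracts all names into a list and then builds the dict by inserting each first-seen name once with names.count(name), counting by rescanning the list.
import Mathlib
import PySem

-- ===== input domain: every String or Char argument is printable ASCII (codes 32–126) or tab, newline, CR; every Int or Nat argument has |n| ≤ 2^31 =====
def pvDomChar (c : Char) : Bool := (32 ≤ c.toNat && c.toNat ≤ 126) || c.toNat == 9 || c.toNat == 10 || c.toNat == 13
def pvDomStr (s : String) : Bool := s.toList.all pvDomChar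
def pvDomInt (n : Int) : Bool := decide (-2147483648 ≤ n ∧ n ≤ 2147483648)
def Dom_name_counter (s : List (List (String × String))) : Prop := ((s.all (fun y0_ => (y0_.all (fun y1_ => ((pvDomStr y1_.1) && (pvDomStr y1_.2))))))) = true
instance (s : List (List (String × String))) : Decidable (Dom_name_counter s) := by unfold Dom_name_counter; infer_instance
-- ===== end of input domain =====

-- B collects all names first and builds the result dict by rescanning the list to
-- count each first-seen name, instead of A's incremental running-counter pass
-- (alternative decomposition, same return value on Pre_).


-- ===== PORT A =====
-- for persons in s: x = persons['first_name']; if x in n_counts: n_counts[x] += 1 else: n_counts[x] = 1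
def name_counter (s : List (List (String × String))) : List (String × Int) :=
  (s.foldl (fun nc persons =>
      match (PySem.Dict.ofList persons).get? "first_name" with
      | some x =>
          if nc.contains x then nc.insert x (nc.getD x 0 + 1)  -- n_counts[x] += 1 (key present)
          else nc.insert x 1
      | none => nc)   -- KeyError in Python; excluded by Pre_name_counter
    PySem.Dict.empty).items

-- ===== PORT B =====
def name_counter_alt (s : List (List (String × String))) : List (String × Int) :=
  let names := s.map (fun persons =>
    ((PySem.Dict.ofList persons).get? "first_name").getD "")  -- KeyError excluded by Pre_name_counter
  (names.foldl (fun r name =>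
      if r.contains name then r
      else r.insert name ((PySem.List.count names name : Nat) : Int))
    PySem.Dict.empty).items

-- ===== PRECONDITION & SPEC =====
-- Pre_ excludes exactly the inputs where some record lacks the key 'first_name': Python A raises KeyError there.
def Pre_name_counter (s : List (List (String × String))) : Prop :=
  ∀ persons ∈ s, "first_name" ∈ persons.map (·.1)
instance (s : List (List (String × String))) : Decidable (Pre_name_counter s) := by unfold Pre_name_counter; infer_instance

def pvWitness_name_counter : (List (List (String × String))) :=
  [[("first_name", "Ann"), ("age", "3")], [("first_name", "Bob")], [("first_name", "Ann")]]

def Spec_name_counter (s : List (List (String × String))) (out : List (String × Int)) : Prop := out = name_counter_alt s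
instance (s : List (List (String × String))) (out : List (String × Int)) : Decidable (Spec_name_counter s out) := by unfold Spec_name_counter; infer_instance

-- ===== CLAIM (what is proved, stated in full; the proofs are below) =====
def Claim_equal_name_counter : Prop := ∀ (s : List (List (String × String))), Dom_name_counter s → Pre_name_counter s → Spec_name_counter s (name_counter s)

-- ===== LEMMAS AND PROOFS =====

theorem contains_ofList {K V : Type} [BEq K] [LawfulBEq K] (ps : List (K × V)) (k : K) :
    (PySem.Dict.ofList ps).contains k = true ↔ k ∈ ps.map (·.1) := by
  rw [PySem.Dict.contains_iff_mem_keys]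
  unfold PySem.Dict.ofList PySem.Dict.update
  rw [PySem.Dict.keys_foldl_insert_key ps (·.1) (fun _ p => p.2)]
  simp [PySem.Dict.keys_empty, PySem.Set.update_nil_left, PySem.Set.mem_ofList]

-- Under Pre_, A's fold over the records is the counter fold over the extracted names.
theorem A_fold_eq_names_fold (s : List (List (String × String))) (d : PySem.Dict String Int)
    (h : Pre_name_counter s) :
    s.foldl (fun nc persons =>
      match (PySem.Dict.ofList persons).get? "first_name" with
      | some x =>
          if nc.contains x then nc.insert x (nc.getD x 0 + 1)
          else nc.insert x 1
      | none => nc) d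
    = (s.map (fun persons => ((PySem.Dict.ofList persons).get? "first_name").getD "")).foldl
        (fun nc x => if nc.contains x then nc.insert x (nc.getD x 0 + 1) else nc.insert x 1) d := by
  induction s generalizing d with
  | nil => rfl
  | cons p rest ih =>
    have hp : "first_name" ∈ p.map (·.1) := h p (by simp)
    have hsome : ((PySem.Dict.ofList p).get? "first_name").isSome := by
      rw [← PySem.Dict.contains_eq_isSome_get?]
      exact (contains_ofList p "first_name").mpr hp
    obtain ⟨x, hx⟩ := Option.isSome_iff_exists.mp hsome
    simp only [List.foldl_cons, List.map_cons, hx, Option.getD_some]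
    exact ih _ (fun q hq => h q (by simp [hq]))

-- A's per-name step equals the counter step.
theorem A_step_eq_counter (names : List String) (d : PySem.Dict String Int) :
    names.foldl (fun nc x => if nc.contains x then nc.insert x (nc.getD x 0 + 1) else nc.insert x 1) d
    = names.foldl (fun nc x => nc.insert x (nc.getD x 0 + 1)) d := by
  induction names generalizing d with
  | nil => rfl
  | cons x rest ih =>
    simp only [List.foldl_cons]
    by_cases hc : d.contains x = true
    · rw [if_pos hc, ih]
    · rw [if_neg hc, PySem.Dict.getD_of_not_contains d 0 (by simpa using hc), zero_add]
      exact ih _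

-- B's fold appends the new distinct names with their total counts.
theorem B_fold_items (L l : List String) (d : PySem.Dict String Int) :
    (l.foldl (fun r name => if r.contains name then r
        else r.insert name ((PySem.List.count L name : Nat) : Int)) d).items
    = d.items ++ ((PySem.Set.ofList l).filter (fun n => !(d.contains n))).map
        (fun k => (k, ((PySem.List.count L k : Nat) : Int))) := by
  induction l generalizing d with
  | nil => simp [PySem.Set.ofList]
  | cons n rest ih =>
    simp only [List.foldl_cons, PySem.Set.ofList_cons]
    by_cases hc : d.contains n = true
    · rw [if_pos hc, ih]
      congr 2
      simp only [List.filter_cons, hc, Bool.not_true, Bool.false_eq_true, if_false]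
      unfold PySem.Set.discard
      rw [List.filter_filter]
      refine (List.filter_congr ?_).symm
      intro y hy
      by_cases hyn : y = n
      · subst hyn; simp [hc]
      · simp [hyn]
    · have hcf : d.contains n = false := by simpa using hc
      rw [if_neg hc, ih, PySem.Dict.items_insert_of_not_contains d _ hcf]
      simp only [List.filter_cons, hcf, Bool.not_false, if_true, List.map_cons,
        List.append_assoc, List.singleton_append]
      congr 2
      unfold PySem.Set.discard
      rw [List.filter_filter]
      congr 1
      apply List.filter_congr
      intro y hy
      rw [PySem.Dict.contains_insert]
      simp [Bool.not_or, Bool.and_comm]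

-- ===== VERDICT (by name: the statement is the Claim_ definition above) =====
theorem name_counter_spec : Claim_equal_name_counter := by
  intro s _ hpre
  unfold Spec_name_counter name_counter name_counter_alt
  rw [A_fold_eq_names_fold s _ hpre, A_step_eq_counter,
      PySem.Dict.foldl_insert_getD_add_one_eq_counter, PySem.Dict.items_counter,
      B_fold_items]
  simp [PySem.Dict.empty, PySem.List.count_eq]
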